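-- pv_equiv track=rewrite | github.com/daniel-reich/ubiquitous-fiesta | 4xZFisQX8NnYB3nv4_3.py | maximum_seating
-- ===== SOURCE A (Python) =====
-- def maximum_seating(lst):
--     lst = [0, 0] + lst + [0, 0]
--     newly_filled = 0
--     for idx, i in enumerate(lst[2:], 2):
--         if i == 0 and lst[idx-2:idx] == [0, 0] and lst[idx+1:idx+3] == [0, 0]:
--             lst[idx] = 1
--             newly_filled += 1
--     return newly_filled
-- ===== SOURCE B (Python) =====
-- def maximum_seating(lst):
--     # Segment decomposition: split into maximal runs of empty seats and count each
--     # run by the closed form max(0, (eff - 2) // 3), where eff is the run length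
--     # plus 2 for each open (list-boundary) end, instead of simulating the greedy.
--     total = 0
--     at_left = True
--     n = len(lst)
--     i = 0
--     while i < n:
--         if lst[i] != 0:
--             i += 1
--         else:
--             j = i
--             while j < n and lst[j] == 0:
--                 j += 1
--             run = j - i
--             eff = run + (2 if at_left else 0) + (2 if j == n else 0)
--             if eff >= 2:
--                 total += (eff - 2) // 3
--             i = j
--         at_left = False
--     return total
-- ===== Notes on version B (the rewrite author's own statement) =====
-- stated objective: alternative
-- what changed: B no longer simulates the greedy placement seat by seat: it splits the list into maximal runs of empty seats and counts each run in O(1) with the closed form (eff-2)//3, where eff is the run length plus 2 for each open list boundary.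
import Mathlib
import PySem

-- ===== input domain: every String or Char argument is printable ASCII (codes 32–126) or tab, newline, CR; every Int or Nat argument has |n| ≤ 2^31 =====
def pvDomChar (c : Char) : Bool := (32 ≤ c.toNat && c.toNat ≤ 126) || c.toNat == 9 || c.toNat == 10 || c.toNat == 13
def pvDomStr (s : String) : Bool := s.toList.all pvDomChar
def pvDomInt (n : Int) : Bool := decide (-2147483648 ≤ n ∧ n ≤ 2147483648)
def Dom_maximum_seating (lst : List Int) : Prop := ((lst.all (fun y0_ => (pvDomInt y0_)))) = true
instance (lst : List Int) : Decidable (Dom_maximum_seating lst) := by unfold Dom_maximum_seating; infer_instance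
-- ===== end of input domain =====

-- B replaces A's seat-by-seat greedy over a padded mutable copy by a segment
-- decomposition: each maximal run of zeros is counted in one step by a closed-form
-- formula. Same return value; A mutates only its local padded copy, so no visible
-- side effect differs.

-- ===== PORT A =====
-- the loop: state is the (mutated) padded list and the counter; iterates over the
-- snapshot enumerate(lst[2:], 2) taken before any mutation
def msAgo : List (Int × Int) → List Int → Int → (List Int × Int)
  | [], l, c => (l, c)
  | (idx, i) :: rest, l, c =>
    if i = 0 ∧ PySem.List.slice l (some (idx - 2)) (some idx) = [0, 0] ∧
        PySem.List.slice l (some (idx + 1)) (some (idx + 3)) = [0, 0] then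
      msAgo rest (PySem.List.pySetD l idx 1) (c + 1)
    else
      msAgo rest l c

def maximum_seating (lst : List Int) : Int :=
  let l := [0, 0] ++ lst ++ [0, 0]
  (msAgo (PySem.List.enumerate (PySem.List.slice l (some 2) none) 2) l 0).2

-- ===== PORT B =====
-- Source B's inner while loop: run = j - i = length of the leading run of zeros of lst[i:]
def zrun : List Int → Nat
  | [] => 0
  | x :: r => if x = 0 then zrun r + 1 else 0

-- Source B's outer while loop over i: the suffix lst[i:] is the recursion argument
-- (i ↔ the dropped prefix); a run of zeros is consumed in one step and counted
-- by the closed form (eff - 2) // 3; 'j == n' is 'run = length of the suffix'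
def msSeg : List Int → Bool → Int → Int
  | [], _, total => total
  | x :: r, atLeft, total =>
    if h : x ≠ 0 then msSeg r false total
    else
      -- run = zrun (x :: r); eff = run + (2 if at_left) + (2 if run == len(rest))
      msSeg ((x :: r).drop (zrun (x :: r))) false
        (if ((zrun (x :: r) : Int) + (if atLeft then 2 else 0) +
            (if zrun (x :: r) = (x :: r).length then 2 else 0)) ≥ 2 then
          total + PySem.Int.floordiv
            (((zrun (x :: r) : Int) + (if atLeft then 2 else 0) +
              (if zrun (x :: r) = (x :: r).length then 2 else 0)) - 2) 3
        else total)
termination_by l _ _ => l.length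
decreasing_by
  · simp
  · have hx : x = 0 := not_not.mp h
    have h1 : 0 < zrun (x :: r) := by simp [zrun, hx]
    simp [List.length_drop]
    omega

def maximum_seating_alt (lst : List Int) : Int := msSeg lst true 0

-- ===== PRECONDITION & SPEC =====
def Spec_maximum_seating (lst : List Int) (out : Int) : Prop := out = maximum_seating_alt lst
instance (lst : List Int) (out : Int) : Decidable (Spec_maximum_seating lst out) := by unfold Spec_maximum_seating; infer_instance

-- ===== CLAIM (what is proved, stated in full; the proofs are below) =====
def Claim_equal_maximum_seating : Prop := ∀ (lst : List Int), Dom_maximum_seating lst → Spec_maximum_seating lst (maximum_seating lst)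

-- ===== LEMMAS AND PROOFS =====

-- proof-only intermediate: the scalar-last greedy (last = index of the most recently
-- occupied seat, -3 for the open left edge); A is first reduced to it, then it is
-- reduced to B's per-run closed form
def greedyLast (lst : List Int) (n : Int) : List (Int × Int) → Int → Int → Int
  | [], _, count => count
  | (j, x) :: rest, last, count =>
    if x ≠ 0 then greedyLast lst n rest j count
    else if j - last ≥ 3 ∧ (j + 1 ≥ n ∨ PySem.List.pyGetD lst (j + 1) 0 = 0) ∧
        (j + 2 ≥ n ∨ PySem.List.pyGetD lst (j + 2) 0 = 0) then
      greedyLast lst n rest j (count + 1)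
    else greedyLast lst n rest last count

lemma take2_drop {α : Type} (l : List α) (a : Nat) (h : a + 1 < l.length) :
    (l.drop a).take 2 = [l[a], l[a+1]'h] := by
  have h0 : a < l.length := by omega
  rw [List.drop_eq_getElem_cons h0, List.drop_eq_getElem_cons h]
  simp [List.take]

lemma short_slice (l : List Int) (a : Int) (h0 : 0 ≤ a) (h : (l.length : Int) ≤ a + 1) :
    PySem.List.slice l (some a) (some (a + 2)) ≠ [0, 0] := by
  rw [PySem.List.slice_toNat l h0 (by omega)]
  intro hEq
  have := congrArg List.length hEq
  simp [List.length_take, List.length_drop] at this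
  omega

lemma padget (lst : List Int) (q : Nat) (hq : q ≤ lst.length + 1) :
    ((lst ++ [0, 0] : List Int)[q]? = some 0 ↔
      ((lst.length : Int) ≤ (q : Int) ∨ PySem.List.pyGetD lst (q : Int) 0 = 0)) := by
  rcases Nat.lt_or_ge q lst.length with h | h
  · rw [List.getElem?_append_left h, List.getElem?_eq_getElem h,
      PySem.List.pyGetD_natCast, List.getD_eq_getElem?_getD, List.getElem?_eq_getElem h]
    constructor
    · intro he
      right
      simpa using he
    · rintro (hc | hc)
      · exact absurd (by exact_mod_cast hc) (by omega)
      · simpa using hc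
  · rw [List.getElem?_append_right h]
    constructor
    · intro _
      left
      exact_mod_cast h
    · intro _
      have h2 : q - lst.length = 0 ∨ q - lst.length = 1 := by omega
      rcases h2 with h2 | h2 <;> rw [h2] <;> rfl

-- the key invariant-transport lemma: A's padded-list greedy equals the scalar-last greedy
lemma ms_main (lst : List Int) (rest : List Int) :
    ∀ (j : Nat) (l : List Int) (last c : Int),
    lst.drop j = rest →
    l.length = lst.length + 4 →
    (∀ p : Nat, j + 2 ≤ p → l[p]? = ([0, 0] ++ lst ++ [0, 0] : List Int)[p]?) →
    (last = -3 ∨ (0 ≤ last ∧ last < (j : Int) ∧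
        ∃ v, l[(last + 2).toNat]? = some v ∧ v ≠ 0)) →
    (∀ p : Nat, last + 2 < (p : Int) → p < j + 2 → l[p]? = some 0) →
    (msAgo (PySem.List.enumerate (rest ++ [0, 0]) ((j : Int) + 2)) l c).2
      = greedyLast lst (lst.length : Int) (PySem.List.enumerate rest (j : Int)) last c := by
  induction rest generalizing lst with
  | nil =>
    intro j l last c hdrop hlen hpt hlast hzero
    have hl : (l.length : Int) = (lst.length : Int) + 4 := by exact_mod_cast congrArg Nat.cast hlen
    have hj : lst.length ≤ j := by
      have := congrArg List.length hdrop
      simp at this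
      omega
    have hne : ∀ (k : Int), (lst.length : Int) + 2 ≤ k →
        ¬ (True ∧ PySem.List.slice l (some (k - 2)) (some k) = [0, 0] ∧
           PySem.List.slice l (some (k + 1)) (some (k + 3)) = [0, 0]) := by
      rintro k hk ⟨-, -, h3⟩
      refine short_slice l (k + 1) (by omega) (by omega) ?_
      have e : k + 1 + 2 = k + 3 := by ring
      rw [e]
      exact h3
    have hjle : (lst.length : Int) + 2 ≤ (j : Int) + 2 := by
      have : (lst.length : Int) ≤ (j : Int) := by exact_mod_cast hj
      omega
    simp only [List.nil_append, PySem.List.enumerate_cons, PySem.List.enumerate_nil,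
      msAgo, greedyLast]
    rw [if_neg (hne ((j : Int) + 2) hjle), if_neg (hne ((j : Int) + 2 + 1) (by omega))]
  | cons x rest' ih =>
    intro j l last c hdrop hlen hpt hlast hzero
    have hjn : j < lst.length := by
      have := congrArg List.length hdrop
      simp at this
      omega
    have hxj : lst[j]? = some x := by
      have h0 : (lst.drop j)[0]? = some x := by rw [hdrop]; rfl
      rwa [List.getElem?_drop] at h0
    have hgetl : ∀ p : Nat, j ≤ p → l[p + 2]? = (lst ++ [0, 0])[p]? := by
      intro p hp
      rw [hpt (p + 2) (by omega), List.append_assoc,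
        List.getElem?_append_right (show ([0, 0] : List Int).length ≤ p + 2 by simp)]
      norm_num
    have hcur : l[j + 2]? = some x := by
      rw [hgetl j le_rfl, List.getElem?_append_left hjn]
      exact hxj
    have hsliceL : PySem.List.slice l (some ((j : Int) + 2 - 2)) (some ((j : Int) + 2))
        = [l[j]'(by omega), l[j + 1]'(by omega)] := by
      rw [show (j : Int) + 2 - 2 = ((j : Nat) : Int) from by ring,
        show (j : Int) + 2 = ((j + 2 : Nat) : Int) from by push_cast; ring,
        PySem.List.slice_natCast, show j + 2 - j = 2 from by omega, take2_drop l j (by omega)]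
    have hLiff : (PySem.List.slice l (some ((j : Int) + 2 - 2)) (some ((j : Int) + 2)) = [0, 0])
        ↔ (j : Int) - last ≥ 3 := by
      rw [hsliceL]
      constructor
      · intro he
        have h1 : l[j]'(by omega) = 0 ∧ l[j + 1]'(by omega) = 0 := by simpa using he
        by_contra hge
        push Not at hge
        rcases hlast with h3 | ⟨ha, hb, v, hv, hvne⟩
        · omega
        · have hcases : (last + 2).toNat = j ∨ (last + 2).toNat = j + 1 := by omega
          rcases hcases with hcc | hcc <;>
            rw [hcc, List.getElem?_eq_getElem (by omega)] at hv <;> simp at hv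
          · exact hvne (by rw [← hv]; exact h1.1)
          · exact hvne (by rw [← hv]; exact h1.2)
      · intro hge
        have h1 := hzero j (by omega) (by omega)
        have h2 := hzero (j + 1) (by push_cast; omega) (by omega)
        rw [List.getElem?_eq_getElem (by omega)] at h1
        rw [List.getElem?_eq_getElem (by omega)] at h2
        simp at h1 h2
        simp [h1, h2]
    have hR1 : (l[j + 3]? = some 0) ↔
        ((j : Int) + 1 ≥ (lst.length : Int) ∨ PySem.List.pyGetD lst ((j : Int) + 1) 0 = 0) := by
      have h0 := hgetl (j + 1) (by omega)
      rw [show j + 1 + 2 = j + 3 from by omega] at h0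
      rw [h0, show (j : Int) + 1 = ((j + 1 : Nat) : Int) from by push_cast; ring]
      exact padget lst (j + 1) (by omega)
    have hR2 : (l[j + 4]? = some 0) ↔
        ((j : Int) + 2 ≥ (lst.length : Int) ∨ PySem.List.pyGetD lst ((j : Int) + 2) 0 = 0) := by
      have h0 := hgetl (j + 2) (by omega)
      rw [show j + 2 + 2 = j + 4 from by omega] at h0
      rw [h0, show (j : Int) + 2 = ((j + 2 : Nat) : Int) from by push_cast; ring]
      exact padget lst (j + 2) (by omega)
    have hsliceR : PySem.List.slice l (some ((j : Int) + 2 + 1)) (some ((j : Int) + 2 + 3))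
        = [l[j + 3]'(by omega), l[j + 4]'(by omega)] := by
      rw [show (j : Int) + 2 + 1 = ((j + 3 : Nat) : Int) from by push_cast; ring,
        show (j : Int) + 2 + 3 = ((j + 5 : Nat) : Int) from by push_cast; ring,
        PySem.List.slice_natCast, show j + 5 - (j + 3) = 2 from by omega,
        take2_drop l (j + 3) (by omega)]
    have hRiff : (PySem.List.slice l (some ((j : Int) + 2 + 1)) (some ((j : Int) + 2 + 3)) = [0, 0])
        ↔ (((j : Int) + 1 ≥ (lst.length : Int) ∨ PySem.List.pyGetD lst ((j : Int) + 1) 0 = 0) ∧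
           ((j : Int) + 2 ≥ (lst.length : Int) ∨ PySem.List.pyGetD lst ((j : Int) + 2) 0 = 0)) := by
      rw [hsliceR]
      rw [← hR1, ← hR2, List.getElem?_eq_getElem (show j + 3 < l.length by omega),
        List.getElem?_eq_getElem (show j + 4 < l.length by omega)]
      simp
    have hdrop' : lst.drop (j + 1) = rest' := by
      have h0 : List.drop 1 (List.drop j lst) = rest' := by rw [hdrop]; rfl
      rwa [List.drop_drop] at h0
    have estart : (j : Int) + 2 + 1 = ((j + 1 : Nat) : Int) + 2 := by push_cast; ring
    have estartB : (j : Int) + 1 = ((j + 1 : Nat) : Int) := by push_cast; ring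
    rw [List.cons_append, PySem.List.enumerate_cons, PySem.List.enumerate_cons]
    simp only [msAgo, greedyLast]
    by_cases hx : x = 0
    · subst hx
      rw [if_neg (show ¬ ((0 : Int) ≠ 0) by simp)]
      by_cases hc : ((j : Int) - last ≥ 3 ∧
          ((j : Int) + 1 ≥ (lst.length : Int) ∨ PySem.List.pyGetD lst ((j : Int) + 1) 0 = 0) ∧
          ((j : Int) + 2 ≥ (lst.length : Int) ∨ PySem.List.pyGetD lst ((j : Int) + 2) 0 = 0))
      · rw [if_pos ⟨rfl, hLiff.mpr hc.1, hRiff.mpr hc.2⟩, if_pos hc, estart, estartB]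
        have hset : PySem.List.pySetD l ((j : Int) + 2) 1 = l.set (j + 2) 1 := by
          rw [show (j : Int) + 2 = ((j + 2 : Nat) : Int) from by push_cast; ring,
            PySem.List.pySetD_natCast]
        rw [hset]
        apply ih lst (j + 1) (l.set (j + 2) 1) (j : Int) (c + 1) hdrop' (by simp [hlen])
        · intro p hp
          rw [List.getElem?_set, if_neg (by omega)]
          exact hpt p (by omega)
        · refine Or.inr ⟨Int.natCast_nonneg j, by push_cast; omega, 1, ?_, by decide⟩
          rw [show ((j : Int) + 2).toNat = j + 2 from by omega, List.getElem?_set,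
            if_pos rfl, if_pos (by omega)]
        · intro p h1 h2
          have : (p : Int) < (j : Int) + 3 := by exact_mod_cast Nat.cast_lt.mpr (by omega)
          omega
      · rw [if_neg (fun h => hc ⟨hLiff.mp h.2.1, hRiff.mp h.2.2⟩), if_neg hc, estart, estartB]
        apply ih lst (j + 1) l last c hdrop' hlen
        · intro p hp
          exact hpt p (by omega)
        · rcases hlast with h3 | ⟨ha, hb, w⟩
          · exact Or.inl h3
          · exact Or.inr ⟨ha, by push_cast; omega, w⟩
        · intro p h1 h2
          by_cases hp : p < j + 2
          · exact hzero p h1 hp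
          · have hpe : p = j + 2 := by omega
            rw [hpe]
            exact hcur
    · rw [if_neg (fun h => hx h.1), if_pos hx, estart, estartB]
      apply ih lst (j + 1) l (j : Int) c hdrop' hlen
      · intro p hp
        exact hpt p (by omega)
      · refine Or.inr ⟨Int.natCast_nonneg j, by push_cast; omega, x, ?_, hx⟩
        rw [show ((j : Int) + 2).toNat = j + 2 from by omega]
        exact hcur
      · intro p h1 h2
        have : (p : Int) < (j : Int) + 3 := by exact_mod_cast Nat.cast_lt.mpr (by omega)
        omega

theorem a_eq_greedyLast (lst : List Int) :
    maximum_seating lst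
      = greedyLast lst (lst.length : Int) (PySem.List.enumerate lst 0) (-3) 0 := by
  show (msAgo (PySem.List.enumerate
      (PySem.List.slice ([0, 0] ++ lst ++ [0, 0] : List Int) (some 2) none) 2)
      ([0, 0] ++ lst ++ [0, 0]) 0).2 = _
  have hs : PySem.List.slice ([0, 0] ++ lst ++ [0, 0] : List Int) (some 2) none
      = lst ++ [0, 0] := by
    rw [PySem.List.slice_from _ (by omega)]
    simp
  rw [hs]
  have h := ms_main lst lst 0 ([0, 0] ++ lst ++ [0, 0]) (-3) 0 (by simp) (by simp)
    (fun p _ => rfl) (Or.inl rfl)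
    (fun p _ hp => by interval_cases p <;> rfl)
  simpa using h

-- ===== bridge from the scalar-last greedy to B's per-run closed form =====

-- the closed-form count of one run: t = M - last, clamped at 0
def cnt3 (t : Int) : Int := if t < 0 then 0 else t / 3

lemma greedyLast_irrel (lst : List Int) (rest' : List Int)
    (hr : rest' = [] ∨ rest'.headI ≠ 0) (m l1 l2 c : Int) :
    greedyLast lst (lst.length : Int) (PySem.List.enumerate rest' m) l1 c
      = greedyLast lst (lst.length : Int) (PySem.List.enumerate rest' m) l2 c := by
  rcases rest' with _ | ⟨y, t⟩
  · rfl
  · have hy : y ≠ 0 := by simpa using hr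
    rw [PySem.List.enumerate_cons]
    simp only [greedyLast, if_pos hy]

lemma zrun_decomp (l : List Int) :
    List.replicate (zrun l) (0 : Int) ++ l.drop (zrun l) = l := by
  induction l with
  | nil => rfl
  | cons x r ih =>
    by_cases hx : x = 0
    · subst hx
      simp [zrun, List.replicate_succ, ih]
    · simp [zrun, hx]

lemma zrun_rest (l : List Int) :
    l.drop (zrun l) = [] ∨ (l.drop (zrun l)).headI ≠ 0 := by
  induction l with
  | nil => exact Or.inl rfl
  | cons x r ih =>
    by_cases hx : x = 0
    · subst hx
      simpa [zrun] using ih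
    · right
      simpa [zrun, hx] using hx

-- greedy consumption of one whole run of zeros
lemma run_greedy (lst : List Int) (rest' : List Int)
    (hr : rest' = [] ∨ rest'.headI ≠ 0) :
    ∀ (k j : Nat) (last c l2 : Int),
    lst.drop j = List.replicate k 0 ++ rest' →
    ((j : Int) ≤ last + 3 ∨ ((j : Int) + k - (if rest' = [] then 1 else 3)) ≤ last + 2) →
    greedyLast lst (lst.length : Int)
        (PySem.List.enumerate (List.replicate k 0 ++ rest') (j : Int)) last c
      = greedyLast lst (lst.length : Int)
          (PySem.List.enumerate rest' (((j + k : Nat) : Int))) l2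
          (c + cnt3 ((j : Int) + k - (if rest' = [] then 1 else 3) - last)) := by
  intro k
  induction k with
  | zero =>
    intro j last c l2 hdrop hinv
    simp only [Nat.cast_zero, add_zero, Nat.add_zero, List.replicate_zero, List.nil_append] at hinv ⊢
    have hc : cnt3 ((j : Int) - (if rest' = [] then 1 else 3) - last) = 0 := by
      unfold cnt3
      split_ifs at hinv ⊢ <;> omega
    rw [hc, add_zero]
    exact greedyLast_irrel lst rest' hr (j : Int) last l2 c
  | succ k ih =>
    intro j last c l2 hdrop hinv
    set d : Int := (if rest' = [] then 1 else 3) with hd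
    have hdb : d = 1 ∨ d = 3 := by
      rw [hd]; split_ifs <;> simp
    have hlen : lst.length = j + (k + 1) + rest'.length := by
      have := congrArg List.length hdrop
      simp [List.length_drop, List.length_replicate] at this
      omega
    have hget : ∀ i : Nat, lst[j + i]? = (List.replicate (k + 1) (0 : Int) ++ rest')[i]? := by
      intro i
      rw [← List.getElem?_drop, hdrop]
    have hget1 : PySem.List.pyGetD lst ((j : Int) + 1) 0 = 0 ↔
        lst[j + 1]? = some 0 ∨ lst.length ≤ j + 1 := by
      rw [show (j : Int) + 1 = ((j + 1 : Nat) : Int) from by push_cast; ring,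
        PySem.List.pyGetD_natCast, List.getD_eq_getElem?_getD]
      rcases Nat.lt_or_ge (j + 1) lst.length with h | h
      · rw [List.getElem?_eq_getElem h]
        constructor
        · intro he; exact Or.inl (by simpa using he)
        · rintro (he | he)
          · simpa using he
          · omega
      · rw [List.getElem?_eq_none (by omega)]
        constructor
        · intro _; exact Or.inr h
        · intro _; rfl
    have hget2 : PySem.List.pyGetD lst ((j : Int) + 2) 0 = 0 ↔
        lst[j + 2]? = some 0 ∨ lst.length ≤ j + 2 := by
      rw [show (j : Int) + 2 = ((j + 2 : Nat) : Int) from by push_cast; ring,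
        PySem.List.pyGetD_natCast, List.getD_eq_getElem?_getD]
      rcases Nat.lt_or_ge (j + 2) lst.length with h | h
      · rw [List.getElem?_eq_getElem h]
        constructor
        · intro he; exact Or.inl (by simpa using he)
        · rintro (he | he)
          · simpa using he
          · omega
      · rw [List.getElem?_eq_none (by omega)]
        constructor
        · intro _; exact Or.inr h
        · intro _; rfl
    -- the neighbour condition of the greedy, reduced to a bound on j
    have hcond : (((j : Int) + 1 ≥ (lst.length : Int) ∨ PySem.List.pyGetD lst ((j : Int) + 1) 0 = 0) ∧
        ((j : Int) + 2 ≥ (lst.length : Int) ∨ PySem.List.pyGetD lst ((j : Int) + 2) 0 = 0)) ↔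
        ((j : Int) ≤ (j : Int) + (k + 1) - d) := by
      rcases hr with hre | hrne
      · have hd1 : d = 1 := by rw [hd, if_pos hre]
        subst hre
        simp only [List.length_nil, Nat.add_zero] at hlen
        constructor
        · intro _
          rw [hd1]
          push_cast
          omega
        · intro _
          constructor
          · rcases Nat.lt_or_ge (j + 1) lst.length with h | h
            · right
              rw [hget1]
              left
              rw [hget 1, List.getElem?_append_left (by simp; omega),
                List.getElem?_eq_getElem (by simp; omega)]
              simp
            · left
              push_cast
              omega
          · rcases Nat.lt_or_ge (j + 2) lst.length with h | h
            · right
              rw [hget2]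
              left
              rw [hget 2, List.getElem?_append_left (by simp; omega),
                List.getElem?_eq_getElem (by simp; omega)]
              simp
            · left
              push_cast
              omega
      · have hne : rest' ≠ [] := by
          intro he
          rw [he] at hrne
          simp at hrne
        have hd3 : d = 3 := by rw [hd, if_neg hne]
        obtain ⟨y, t, hyt⟩ := List.exists_cons_of_ne_nil hne
        have hy : y ≠ 0 := by
          rw [hyt] at hrne
          simpa using hrne
        have hrl : 1 ≤ rest'.length := by rw [hyt]; simp
        constructor
        · rintro ⟨h1, h2⟩
          rw [hd3]
          by_contra hk
          push_cast at hk
          have hk2 : k = 0 ∨ k = 1 := by omega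
          rcases hk2 with hk0 | hk1
          · subst hk0
            rcases h1 with h1 | h1
            · push_cast at h1; omega
            · rw [hget1] at h1
              rcases h1 with h1 | h1
              · rw [hget 1, List.getElem?_append_right (by simp), hyt] at h1
                simp at h1
                exact hy h1
              · omega
          · subst hk1
            rcases h2 with h2 | h2
            · push_cast at h2; omega
            · rw [hget2] at h2
              rcases h2 with h2 | h2
              · rw [hget 2, List.getElem?_append_right (by simp), hyt] at h2
                simp at h2
                exact hy h2
              · omega
        · intro hk
          rw [hd3] at hk
          have hk2 : 2 ≤ k := by push_cast at hk; omega
          constructor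
          · right
            rw [hget1]
            left
            rw [hget 1, List.getElem?_append_left (by simp; omega),
              List.getElem?_eq_getElem (by simp; omega)]
            simp
          · right
            rw [hget2]
            left
            rw [hget 2, List.getElem?_append_left (by simp; omega),
              List.getElem?_eq_getElem (by simp; omega)]
            simp
    have hdrop' : lst.drop (j + 1) = List.replicate k 0 ++ rest' := by
      have h0 : List.drop 1 (List.drop j lst) = List.replicate k 0 ++ rest' := by
        rw [hdrop, List.replicate_succ]
        rfl
      rwa [List.drop_drop] at h0
    rw [List.replicate_succ, List.cons_append, PySem.List.enumerate_cons]
    simp only [greedyLast, if_neg (show ¬ ((0 : Int) ≠ 0) by simp)]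
    have he1 : ((j : Int) + 1) = (((j + 1 : Nat)) : Int) := by push_cast; ring
    by_cases hp : (j : Int) - last ≥ 3 ∧
        ((j : Int) + 1 ≥ (lst.length : Int) ∨ PySem.List.pyGetD lst ((j : Int) + 1) 0 = 0) ∧
        ((j : Int) + 2 ≥ (lst.length : Int) ∨ PySem.List.pyGetD lst ((j : Int) + 2) 0 = 0)
    · rw [if_pos hp]
      have hjM := hcond.mp hp.2
      push_cast at hjM
      have hj3 : (j : Int) = last + 3 := by
        rcases hinv with h | h
        · omega
        · push_cast at h
          rcases hdb with hb | hb <;> omega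
      rw [he1, ih (j + 1) (j : Int) (c + 1) l2 hdrop' (by left; push_cast; omega)]
      have e2 : j + 1 + k = j + (k + 1) := by omega
      rw [e2]
      congr 1
      unfold cnt3
      push_cast
      split_ifs <;> omega
    · rw [if_neg hp, he1]
      have hinv' : (((j + 1 : Nat)) : Int) ≤ last + 3 ∨
          ((((j + 1 : Nat)) : Int) + k - d) ≤ last + 2 := by
        by_cases hg : (j : Int) - last ≥ 3
        · have hnb : ¬ ((j : Int) ≤ (j : Int) + (k + 1) - d) := fun hb' => hp ⟨hg, hcond.mpr hb'⟩
          right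
          push_cast
          push_cast at hnb
          omega
        · left
          push_cast
          omega
      rw [ih (j + 1) last c l2 hdrop' hinv']
      have e2 : j + 1 + k = j + (k + 1) := by omega
      rw [e2]
      congr 1
      unfold cnt3
      push_cast
      split_ifs <;> omega

-- the outer loop: scalar-last greedy equals the segment recursion
lemma outer_bridge (lst : List Int) :
    ∀ (m : Nat) (rest : List Int), rest.length ≤ m →
    ∀ (j : Nat) (last : Int) (atLeft : Bool) (c : Int),
    lst.drop j = rest →
    ((atLeft = true ∧ j = 0 ∧ last = -3) ∨ (atLeft = false ∧ last = (j : Int) - 1)) →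
    greedyLast lst (lst.length : Int) (PySem.List.enumerate rest (j : Int)) last c
      = msSeg rest atLeft c := by
  intro m
  induction m with
  | zero =>
    intro rest hm j last atLeft c hdrop hinv
    have : rest = [] := List.eq_nil_of_length_eq_zero (by omega)
    subst this
    rw [PySem.List.enumerate_nil]
    simp [greedyLast, msSeg]
  | succ m ih =>
    intro rest hm j last atLeft c hdrop hinv
    rcases rest with _ | ⟨x, r⟩
    · rw [PySem.List.enumerate_nil]
      simp [greedyLast, msSeg]
    · by_cases hx : x ≠ 0
      · rw [PySem.List.enumerate_cons]
        simp only [greedyLast, if_pos hx, msSeg, dif_pos hx]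
        apply ih r (by simp at hm; omega) (j + 1) (j : Int) false c
        · have h0 : List.drop 1 (List.drop j lst) = r := by rw [hdrop]; rfl
          rwa [List.drop_drop] at h0
        · right
          exact ⟨rfl, by push_cast; ring⟩
      · have hx0 : x = 0 := not_not.mp hx
        subst hx0
        set k := zrun ((0 : Int) :: r) with hk
        have hkpos : 1 ≤ k := by rw [hk]; simp [zrun]
        set rest' := ((0 : Int) :: r).drop k with hrest'
        have hdec : List.replicate k (0 : Int) ++ rest' = (0 : Int) :: r := zrun_decomp _
        have hr : rest' = [] ∨ rest'.headI ≠ 0 := zrun_rest _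
        have hdropk : lst.drop (j + k) = rest' := by
          rw [← List.drop_drop, hdrop, hrest']
        have hinv1 : (j : Int) ≤ last + 3 := by
          rcases hinv with ⟨_, hj, hl⟩ | ⟨_, hl⟩ <;> omega
        have hlen2 : ((0 : Int) :: r).length = k + rest'.length := by
          conv_lhs => rw [← hdec]
          simp
        conv_lhs => rw [← hdec]
        rw [run_greedy lst rest' hr k j last c (((j + k : Nat)) - 1)
          (by rw [hdec]; exact hdrop) (Or.inl hinv1)]
        rw [ih rest' (by simp only [List.length_cons] at hm hlen2; omega) (j + k)
          (((j + k : Nat) : Int) - 1) false _ hdropk (Or.inr ⟨rfl, rfl⟩)]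
        simp only [msSeg]
        rw [dif_neg (show ¬ ((0 : Int) ≠ 0) by simp), ← hk, ← hrest']
        congr 1
        have hke : (k = ((0 : Int) :: r).length) ↔ rest' = [] := by
          constructor
          · intro h
            have : rest'.length = 0 := by omega
            exact List.eq_nil_of_length_eq_zero this
          · intro h
            rw [h] at hlen2
            simp only [List.length_nil, Nat.add_zero] at hlen2
            omega
        simp only [hke, PySem.Int.floordiv_eq_ediv_of_pos (show (0 : Int) < 3 by norm_num)]
        rcases hinv with ⟨hA, hj0, hlast⟩ | ⟨hA, hlast⟩
        · subst hA; subst hj0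
          simp only [eq_self_iff_true, if_true]
          unfold cnt3
          push_cast
          split_ifs <;> omega
        · subst hA
          simp only [Bool.false_eq_true, if_false]
          unfold cnt3
          push_cast
          split_ifs <;> omega

theorem b_eq_greedyLast (lst : List Int) :
    greedyLast lst (lst.length : Int) (PySem.List.enumerate lst 0) (-3) 0
      = maximum_seating_alt lst := by
  have h := outer_bridge lst lst.length lst le_rfl 0 (-3) true 0 (by simp)
    (Or.inl ⟨rfl, rfl, rfl⟩)
  simpa using h

-- ===== VERDICT (by name: the statement is the Claim_ definition above) =====
theorem maximum_seating_spec : Claim_equal_maximum_seating := by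
  intro lst _
  unfold Spec_maximum_seating
  rw [a_eq_greedyLast, b_eq_greedyLast]
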